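-- pv_equiv track=rewrite | github.com/Chaaany/SSafy_15_BESTTEAM | 20240228/백준/윤병찬_S3_2503_숫자_야구.py | check
-- ===== SOURCE A (Python) =====
-- def check(question, guess):
--     strike, ball = 0, 0
--     for i in range(3):
--         if question[i] == guess[i]:
--             strike += 1
--         elif question[i] in guess:
--             ball += 1
--     return strike, ball
-- ===== SOURCE B (Python) =====
-- def check(question, guess):
--     def go(qs, gs, k):
--         if k == 0:
--             return (0, 0)
--         s, b = go(qs[1:], gs[1:], k - 1)
--         if qs[0] == gs[0]:
--             return (s + 1, b)
--         if qs[0] in guess: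
--             return (s, b + 1)
--         return (s, b)
--     return go(question, guess, 3)
-- ===== Notes on version B (the rewrite author's own statement) =====
-- stated objective: alternative
-- what changed: Replaces A's indexed for-loop with if/elif accumulators by a structural recursion on the two string suffixes with a countdown of 3, classifying the head pair of each frame and combining the counts back-to-front as the recursion unwinds.
-- outside the precondition, e.g. on check('12', '123'): A raises IndexError, B raises IndexError
import Mathlib
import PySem

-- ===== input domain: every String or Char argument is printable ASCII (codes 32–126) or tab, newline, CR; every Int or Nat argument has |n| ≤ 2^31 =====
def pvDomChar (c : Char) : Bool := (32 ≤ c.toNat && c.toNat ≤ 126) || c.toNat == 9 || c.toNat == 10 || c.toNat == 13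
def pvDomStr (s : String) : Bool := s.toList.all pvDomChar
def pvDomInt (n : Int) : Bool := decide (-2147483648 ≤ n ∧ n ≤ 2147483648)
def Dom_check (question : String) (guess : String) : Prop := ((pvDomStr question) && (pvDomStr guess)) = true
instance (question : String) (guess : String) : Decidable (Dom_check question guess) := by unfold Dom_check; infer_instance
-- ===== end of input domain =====

-- B replaces A's indexed if/elif loop by a structural recursion on the string suffixes, combining counts as it unwinds (alternative decomposition, same cost).

-- ===== PORT A =====
-- the if/elif loop over range(3); out-of-range indexing (Python IndexError) is excluded by Pre_check
def check (question : String) (guess : String) : Int × Int :=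
  (PySem.List.pyRange 0 3 1).foldl (fun (sb : Int × Int) i =>
    match PySem.Str.pyGet? question i, PySem.Str.pyGet? guess i with
    | some qc, some gc =>
        if qc = gc then (sb.1 + 1, sb.2)
        else if PySem.Chars.isIn [qc] guess.toList then (sb.1, sb.2 + 1)
        else sb
    | _, _ => sb) (0, 0)

-- ===== PORT B =====
-- Source B's inner 'go': recursion on the suffixes with countdown k; the branch where a
-- head is missing (Python's qs[0]/gs[0] IndexError) is excluded by Pre_check
def goB (guess : List Char) : List Char → List Char → Nat → Int × Int
  | _, _, 0 => (0, 0)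
  | qs, gs, Nat.succ k =>
      match qs, gs with
      | q :: qt, g :: gt =>
          let sb := goB guess qt gt k
          if q = g then (sb.1 + 1, sb.2)
          else if PySem.Chars.isIn [q] guess then (sb.1, sb.2 + 1)
          else sb
      | _, _ => (0, 0)

def check_alt (question : String) (guess : String) : Int × Int :=
  goB guess.toList question.toList guess.toList 3

-- ===== PRECONDITION & SPEC =====
-- Pre_ excludes strings shorter than 3, on which Python's indexing raises IndexError (in A and B alike).
def Pre_check (question : String) (guess : String) : Prop :=
  3 ≤ question.toList.length ∧ 3 ≤ guess.toList.length
instance (question : String) (guess : String) : Decidable (Pre_check question guess) := by unfold Pre_check; infer_instance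
def pvWitness_check : String × String := ("123", "321")

def Spec_check (question : String) (guess : String) (out : Int × Int) : Prop := out = check_alt question guess
instance (question : String) (guess : String) (out : Int × Int) : Decidable (Spec_check question guess out) := by unfold Spec_check; infer_instance

-- ===== CLAIM =====
def Claim_equal_check : Prop := ∀ (question : String) (guess : String), Dom_check question guess → Pre_check question guess → Spec_check question guess (check question guess)

-- ===== LEMMAS AND PROOFS =====

theorem pyRange03 : PySem.List.pyRange 0 3 1 = [0, 1, 2] := by
  rw [PySem.List.pyRange_one]
  decide

-- ===== VERDICT =====
set_option maxHeartbeats 1000000 in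
theorem check_spec : Claim_equal_check := by
  intro question guess _ hpre
  obtain ⟨hq, hg⟩ := hpre
  unfold Spec_check check check_alt
  rcases hql : question.toList with _ | ⟨a, _ | ⟨b, _ | ⟨c, qt⟩⟩⟩ <;>
    rw [hql] at hq <;> simp at hq <;> try omega
  rcases hgl : guess.toList with _ | ⟨x, _ | ⟨y, _ | ⟨z, gt⟩⟩⟩ <;>
    rw [hgl] at hg <;> simp at hg <;> try omega
  have hq0 : PySem.Str.pyGet? question 0 = some a := by
    rw [show (0:Int) = ((0:Nat):Int) from rfl, PySem.Str.pyGet?_natCast, hql]; rfl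
  have hq1 : PySem.Str.pyGet? question 1 = some b := by
    rw [show (1:Int) = ((1:Nat):Int) from rfl, PySem.Str.pyGet?_natCast, hql]; rfl
  have hq2 : PySem.Str.pyGet? question 2 = some c := by
    rw [show (2:Int) = ((2:Nat):Int) from rfl, PySem.Str.pyGet?_natCast, hql]; rfl
  have hg0 : PySem.Str.pyGet? guess 0 = some x := by
    rw [show (0:Int) = ((0:Nat):Int) from rfl, PySem.Str.pyGet?_natCast, hgl]; rfl
  have hg1 : PySem.Str.pyGet? guess 1 = some y := by
    rw [show (1:Int) = ((1:Nat):Int) from rfl, PySem.Str.pyGet?_natCast, hgl]; rfl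
  have hg2 : PySem.Str.pyGet? guess 2 = some z := by
    rw [show (2:Int) = ((2:Nat):Int) from rfl, PySem.Str.pyGet?_natCast, hgl]; rfl
  rw [pyRange03]
  simp only [List.foldl_cons, List.foldl_nil, goB, hq0, hq1, hq2, hg0, hg1, hg2]
  split_ifs <;> simp_all
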